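-- pv_equiv track=rewrite | github.com/abdulrafayishaCkER/pqc_fine_tuned_model | dataset_generator.py | is_private_ipv4
-- ===== SOURCE A (Python) =====
-- def is_private_ipv4(ip: str) -> bool:
--     """
--     Return True iff ip is syntactically valid IPv4 and within RFC 1918 ranges:
--     10.0.0.0/8, 172.16.0.0/12, 192.168.0.0/16.
--     (Does not include loopback/link-local/CGNAT.)
--     """
--     try:
--         parts = ip.split(".")
--         if len(parts) != 4:
--             return False
--         octets = list(map(int, parts))
--         if not all(0 <= x <= 255 for x in octets):
--             return False
--         a, b, c, d = octets
--     except Exception: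
--         return False
--
--     if a == 10:
--         return True
--     if a == 172 and 16 <= b <= 31:
--         return True
--     if a == 192 and b == 168:
--         return True
--     return False
-- ===== SOURCE B (Python) =====
-- # RFC1918 check via one 32-bit integer tested against the three private ranges.
-- _RFC1918_RANGES = (
--     (0x0A000000, 0x0AFFFFFF),  # 10.0.0.0/8
--     (0xAC100000, 0xAC1FFFFF),  # 172.16.0.0/12
--     (0xC0A80000, 0xC0A8FFFF),  # 192.168.0.0/16
-- )
--
-- def is_private_ipv4(ip: str) -> bool:
--     parts = ip.split(".")
--     if len(parts) != 4:
--         return False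
--     try:
--         octets = [int(p) for p in parts]
--     except ValueError:
--         return False
--     if any(x < 0 or x > 255 for x in octets):
--         return False
--     num = 0
--     for x in octets:
--         num = num * 256 + x
--     return any(lo <= num <= hi for lo, hi in _RFC1918_RANGES)
-- ===== Notes on version B (the rewrite author's own statement) =====
-- stated objective: idiomatic
-- what changed: B folds the four octets into a single 32-bit integer and tests it against a table of the three RFC1918 (lo, hi) integer ranges, replacing A's chain of per-octet if-comparisons.
import Mathlib
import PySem

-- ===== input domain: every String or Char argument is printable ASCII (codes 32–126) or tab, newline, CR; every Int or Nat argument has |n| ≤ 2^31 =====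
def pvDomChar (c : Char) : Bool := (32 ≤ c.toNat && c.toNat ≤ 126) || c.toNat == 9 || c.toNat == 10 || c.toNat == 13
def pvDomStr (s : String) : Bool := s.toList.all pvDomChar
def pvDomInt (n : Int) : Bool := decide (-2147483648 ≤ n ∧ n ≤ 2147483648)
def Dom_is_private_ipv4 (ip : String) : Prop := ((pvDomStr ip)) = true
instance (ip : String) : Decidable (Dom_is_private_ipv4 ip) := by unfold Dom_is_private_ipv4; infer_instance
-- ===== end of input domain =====

-- B tests the address as a single 32-bit integer against the three RFC1918 integer ranges
-- instead of A's per-octet comparisons (objective: idiomatic; same parsing, same cost).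

-- ===== PORT A =====
def is_private_ipv4 (ip : String) : Bool :=
  let parts := PySem.Chars.splitOn ip.toList ['.']
  if parts.length ≠ 4 then false
  else
    match parts.map PySem.Int.ofChars? with
    | [some a, some b, some c, some d] =>
      if !([a, b, c, d].all (fun x => 0 ≤ x && x ≤ 255)) then false
      else if a == 10 then true
      else if a == 172 && 16 ≤ b && b ≤ 31 then true
      else if a == 192 && b == 168 then true
      else false
    | _ => false   -- int() raised ValueError on some part → except → False

-- ===== PORT B =====
def pvRfc1918Ranges : List (Int × Int) :=
  [(167772160, 184549375), (2886729728, 2887778303), (3232235520, 3232301055)]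

def is_private_ipv4_alt (ip : String) : Bool :=
  let parts := PySem.Chars.splitOn ip.toList ['.']
  if parts.length ≠ 4 then false
  else
    match parts.mapM PySem.Int.ofChars? with
    | none => false   -- ValueError in the comprehension → False
    | some octets =>
      if octets.any (fun x => x < 0 || x > 255) then false
      else
        let num := octets.foldl (fun n x => n * 256 + x) 0
        pvRfc1918Ranges.any (fun r => r.1 ≤ num && num ≤ r.2)

-- ===== PRECONDITION & SPEC =====
def Spec_is_private_ipv4 (ip : String) (out : Bool) : Prop := out = is_private_ipv4_alt ip
instance (ip : String) (out : Bool) : Decidable (Spec_is_private_ipv4 ip out) := by unfold Spec_is_private_ipv4; infer_instance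

-- ===== CLAIM (what is proved, stated in full; the proofs are below) =====
def Claim_equal_is_private_ipv4 : Prop := ∀ (ip : String), Dom_is_private_ipv4 ip → Spec_is_private_ipv4 ip (is_private_ipv4 ip)

-- ===== LEMMAS AND PROOFS =====

-- ===== VERDICT (by name: the statement is the Claim_ definition above) =====
theorem is_private_ipv4_spec : Claim_equal_is_private_ipv4 := by
  intro ip _
  unfold Spec_is_private_ipv4 is_private_ipv4 is_private_ipv4_alt
  set parts := PySem.Chars.splitOn ip.toList ['.'] with hparts
  by_cases hlen : parts.length ≠ 4
  · simp [hlen]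
  · rw [not_not] at hlen
    match parts, hlen with
    | [p0, p1, p2, p3], _ =>
      simp only [List.length_cons, List.map, List.mapM]
      cases h0 : PySem.Int.ofChars? p0 <;>
      cases h1 : PySem.Int.ofChars? p1 <;>
      cases h2 : PySem.Int.ofChars? p2 <;>
      cases h3 : PySem.Int.ofChars? p3 <;>
        (simp [List.mapM.loop, h0, h1, h2, h3]) <;>
        (rw [Bool.eq_iff_iff];
         simp only [pvRfc1918Ranges, List.any_cons, List.any_nil, Bool.or_false,
           Bool.and_eq_true, Bool.or_eq_true, Bool.not_eq_true', decide_eq_true_eq,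
           decide_eq_false_iff_not];
         omega)
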